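-- pv_equiv track=rewrite | github.com/ckoons/BubbleSpacetimeTheory | play/toy_1261_separator_duality.py | find_vertex_separators
-- ===== SOURCE A (Python) =====
-- def find_vertex_separators(adj, colors, color_set, u, v, max_sep_size=3):
--     """Find all vertex separators of size ≤ max_sep_size between u and v
--     in the subgraph induced by vertices colored in color_set."""
--     verts = [w for w in adj if colors[w] in color_set and w not in (u, v)]
--     separators = []
--     # Check all subsets up to max_sep_size
--     from itertools import combinations
--     for size in range(1, min(max_sep_size + 1, len(verts) + 1)):
--         for sep in combinations(verts, size):
--             sep_set = set(sep)
--             # Check if removing sep disconnects u from v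
--             visited = set()
--             stack = [u]
--             while stack:
--                 w = stack.pop()
--                 if w in visited or w in sep_set:
--                     continue
--                 visited.add(w)
--                 for x in adj[w]:
--                     if x not in visited and x not in sep_set and colors[x] in color_set:
--                         stack.append(x)
--             if v not in visited:
--                 separators.append(sep)
--     return separators
-- ===== SOURCE B (Python) =====
-- def _connected(adj, colors, color_set, sep_set, u, v):
--     """Level-synchronous BFS from u avoiding sep_set; True iff v is reached."""
--     reach = {u}
--     frontier = [u]
--     # a BFS from u needs at most len(adj) + 1 levels
--     for _ in range(len(adj) + 1):
--         new = []
--         for w in frontier: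
--             for x in adj[w]:
--                 if x not in reach and x not in sep_set and colors[x] in color_set:
--                     reach.add(x)
--                     new.append(x)
--         frontier = new
--     return v in reach
--
--
-- def find_vertex_separators(adj, colors, color_set, u, v, max_sep_size=3):
--     """Find all vertex separators of size ≤ max_sep_size between u and v
--     in the subgraph induced by vertices colored in color_set."""
--     from itertools import combinations
--     verts = [w for w in adj if colors[w] in color_set and w not in (u, v)]
--     return [sep
--             for size in range(1, min(max_sep_size + 1, len(verts) + 1))
--             for sep in combinations(verts, size)
--             if not _connected(adj, colors, color_set, set(sep), u, v)]
-- ===== Notes on version B (the rewrite author's own statement) =====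
-- stated objective: alternative
-- what changed: The per-candidate connectivity test is a level-synchronous BFS (frontier rounds over a reach set, each vertex expanded once) instead of A's explicit-stack DFS with re-pop checks, and the separator list is built by a comprehension (flatMap+filter) instead of nested append loops.
-- outside the precondition, e.g. on find_vertex_separators({1: [], 2: [3]}, {1: 0, 2: 0, 3: 0}, {0}, 1, 9, 3): A returns [(2,)], B returns [(2,)]; on find_vertex_separators({1: [], 2: [3]}, {1: 0, 2: 0}, {0}, 1, 9, 3): A returns [(2,)], B returns [(2,)]
import Mathlib
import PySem

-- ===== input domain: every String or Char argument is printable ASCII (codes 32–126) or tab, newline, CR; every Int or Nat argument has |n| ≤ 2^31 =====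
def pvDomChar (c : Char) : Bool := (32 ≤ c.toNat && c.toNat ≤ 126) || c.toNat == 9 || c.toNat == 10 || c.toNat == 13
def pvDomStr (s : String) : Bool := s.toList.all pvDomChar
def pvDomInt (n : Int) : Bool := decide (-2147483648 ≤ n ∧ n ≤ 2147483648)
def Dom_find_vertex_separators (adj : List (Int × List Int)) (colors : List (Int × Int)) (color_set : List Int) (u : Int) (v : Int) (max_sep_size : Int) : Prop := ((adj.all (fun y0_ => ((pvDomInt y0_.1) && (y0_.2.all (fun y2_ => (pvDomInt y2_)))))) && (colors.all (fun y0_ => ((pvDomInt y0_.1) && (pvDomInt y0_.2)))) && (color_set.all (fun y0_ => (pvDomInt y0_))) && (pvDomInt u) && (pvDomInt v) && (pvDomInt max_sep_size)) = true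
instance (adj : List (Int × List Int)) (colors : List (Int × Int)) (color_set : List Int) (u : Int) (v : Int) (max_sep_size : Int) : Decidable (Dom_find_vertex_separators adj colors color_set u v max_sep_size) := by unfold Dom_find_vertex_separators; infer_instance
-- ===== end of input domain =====

-- B replaces A's explicit-stack DFS connectivity test by a level-synchronous BFS and builds the
-- separator list by comprehension (flatMap + filter); alternative structure, same cost.

-- ===== PORT A =====

def fvsRow (adj : List (Int × List Int)) (w : Int) : List Int := (PySem.Dict.mk adj).getD w []

def fvsColorOk (colors : List (Int × Int)) (color_set : List Int) (x : Int) : Bool :=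
  color_set.contains ((PySem.Dict.mk colors).getD x 0)

def fvsVerts (adj : List (Int × List Int)) (colors : List (Int × Int)) (color_set : List Int) (u v : Int) : List Int :=
  (adj.map Prod.fst).filter (fun w => fvsColorOk colors color_set w && !(w == u) && !(w == v))

def fvsCombos : List Int → Nat → List (List Int)
  | _, 0 => [[]]
  | [], _ + 1 => []
  | x :: xs, k + 1 => (fvsCombos xs k).map (x :: ·) ++ fvsCombos xs (k + 1)

theorem fvsRow_cons (p : Int × List Int) (rest : List (Int × List Int)) (w : Int) :
    fvsRow (p :: rest) w = if p.1 == w then p.2 else fvsRow rest w := by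
  cases p with
  | mk k l =>
    simp only [fvsRow, PySem.Dict.getD_eq_get?_getD, PySem.Dict.get?_mk_cons]
    split <;> simp

theorem fvsRow_length_le (adj : List (Int × List Int)) (w : Int) :
    (fvsRow adj w).length ≤ (adj.map (fun p => p.2.length)).sum := by
  induction adj with
  | nil => simp [fvsRow, PySem.Dict.getD_eq_get?_getD]; rfl
  | cons p rest ih =>
    rw [fvsRow_cons]
    split <;> simp <;> omega

theorem fvsRow_of_not_contains (adj : List (Int × List Int)) (w : Int)
    (h : (PySem.Dict.mk adj).contains w = false) : fvsRow adj w = [] :=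
  PySem.Dict.getD_of_not_contains _ _ h

def dfsA (adj : List (Int × List Int)) (colors : List (Int × Int)) (color_set : List Int)
    (sepS : PySem.Set Int) : PySem.Set Int → List Int → PySem.Set Int
  | vis, [] => vis
  | vis, w :: rest =>
    if vis.contains w || sepS.contains w then
      dfsA adj colors color_set sepS vis rest
    else
      let vis' := PySem.Set.add vis w
      dfsA adj colors color_set sepS vis'
        (((fvsRow adj w).filter
            (fun x => !vis'.contains x && !sepS.contains x && fvsColorOk colors color_set x)).reverse ++ rest)
  termination_by vis st =>
    ((adj.map Prod.fst).toFinset \ vis.toFinset).card * ((adj.map (fun p => p.2.length)).sum + 1) + st.length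
  decreasing_by
  · exact Nat.add_lt_add_left (by simp) _
  · rename_i h
    simp only [Bool.or_eq_true] at h
    push_neg at h
    have hw : w ∉ vis := by
      intro hmem
      exact absurd (by simpa using hmem : vis.contains w = true) h.1
    have hadd : vis.add w = vis ++ [w] := PySem.Set.add_of_not_mem hw
    have hfin : List.toFinset (vis.add w) = insert w vis.toFinset := by
      rw [hadd]; simp [List.toFinset_append]
    have hlen : (List.filter (fun x => !(vis.add w).contains x && !sepS.contains x && fvsColorOk colors color_set x)
        (fvsRow adj w)).reverse.length ≤ (List.map (fun p => p.2.length) adj).sum := by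
      calc _ ≤ (fvsRow adj w).length := by simpa using List.length_filter_le _ _
        _ ≤ _ := fvsRow_length_le adj w
    rw [hfin]
    by_cases hk : w ∈ (List.map Prod.fst adj)
    · have hmem : w ∈ (List.map Prod.fst adj).toFinset \ vis.toFinset := by
        simp [List.mem_toFinset, hk, hw]
      have hcard : ((List.map Prod.fst adj).toFinset \ insert w vis.toFinset).card + 1
          = ((List.map Prod.fst adj).toFinset \ vis.toFinset).card := by
        rw [Finset.sdiff_insert, Finset.card_erase_of_mem hmem]
        have : 0 < ((List.map Prod.fst adj).toFinset \ vis.toFinset).card :=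
          Finset.card_pos.mpr ⟨w, hmem⟩
        omega
      set C := ((List.map Prod.fst adj).toFinset \ insert w vis.toFinset).card with hC
      set T := (List.map (fun p => p.2.length) adj).sum with hT
      rw [← hcard]
      have hexp : (C + 1) * (T + 1) = C * (T + 1) + (T + 1) := by ring
      rw [hexp]
      simp only [List.length_append, List.length_cons]
      omega
    · have hrow : fvsRow adj w = [] := by
        apply fvsRow_of_not_contains
        rw [← Bool.not_eq_true]
        intro hc
        exact hk (by simpa [PySem.Dict.keys] using (PySem.Dict.contains_iff_mem_keys _ _).mp hc)
      have hcard : ((List.map Prod.fst adj).toFinset \ insert w vis.toFinset)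
          = ((List.map Prod.fst adj).toFinset \ vis.toFinset) := by
        rw [Finset.sdiff_insert, Finset.erase_eq_of_notMem]
        simp [List.mem_toFinset, hk]
      rw [hcard, hrow]
      simp

def find_vertex_separators (adj : List (Int × List Int)) (colors : List (Int × Int))
    (color_set : List Int) (u : Int) (v : Int) (max_sep_size : Int) : List (List Int) :=
  let verts := fvsVerts adj colors color_set u v
  (PySem.List.pyRange 1 (min (max_sep_size + 1) ((verts.length : Int) + 1)) 1).foldl
    (fun seps size =>
      (fvsCombos verts size.toNat).foldl
        (fun seps sep =>
          let sepS := PySem.Set.ofList sep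
          let vis := dfsA adj colors color_set sepS (PySem.Set.empty) [u]
          if !vis.contains v then seps ++ [sep] else seps)
        seps)
    []

def fvsStep (colors : List (Int × Int)) (color_set : List Int) (sepS : PySem.Set Int)
    (s : PySem.Set Int × List Int) (x : Int) : PySem.Set Int × List Int :=
  if !s.1.contains x && !sepS.contains x && fvsColorOk colors color_set x then
    (PySem.Set.add s.1 x, s.2 ++ [x])
  else s

def fvsRound (adj : List (Int × List Int)) (colors : List (Int × Int)) (color_set : List Int)
    (sepS : PySem.Set Int) (s : PySem.Set Int × List Int) : PySem.Set Int × List Int :=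
  s.2.foldl (fun t w => (fvsRow adj w).foldl (fvsStep colors color_set sepS) t) (s.1, ([] : List Int))

def fvsConnected (adj : List (Int × List Int)) (colors : List (Int × Int)) (color_set : List Int)
    (sepS : PySem.Set Int) (u v : Int) : Bool :=
  ((PySem.List.pyRange 0 ((adj.length : Int) + 1) 1).foldl
      (fun s _ => fvsRound adj colors color_set sepS s) (([u] : PySem.Set Int), [u])).1.contains v

def find_vertex_separators_alt (adj : List (Int × List Int)) (colors : List (Int × Int))
    (color_set : List Int) (u : Int) (v : Int) (max_sep_size : Int) : List (List Int) :=
  let verts := fvsVerts adj colors color_set u v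
  (PySem.List.pyRange 1 (min (max_sep_size + 1) ((verts.length : Int) + 1)) 1).flatMap
    (fun size =>
      (fvsCombos verts size.toNat).filter
        (fun sep => !fvsConnected adj colors color_set (PySem.Set.ofList sep) u v))


-- ===== PRECONDITION & SPEC =====
-- Pre_ excludes: association lists with duplicate keys (a Python dict cannot carry them, so their
-- first-match reading is accidental); inputs where some key of adj is missing from colors (the
-- comprehension over adj raises KeyError); and, when at least one candidate separator exists
-- (some vertex other than u,v has its colour in color_set and max_sep_size >= 1), inputs where u or
-- a colour-eligible neighbour is missing from adj, or a neighbour from colors (the DFS raises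
-- KeyError); the neighbour conjunct is stated for all adjacency entries rather than only reachable
-- ones, which is slightly conservative.
def Pre_find_vertex_separators (adj : List (Int × List Int)) (colors : List (Int × Int)) (color_set : List Int) (u : Int) (v : Int) (max_sep_size : Int) : Prop :=
  (adj.map Prod.fst).Nodup ∧ (colors.map Prod.fst).Nodup ∧
  (∀ p ∈ adj, (PySem.Dict.mk colors).contains p.1 = true) ∧
  (((adj.map Prod.fst).filter (fun w => fvsColorOk colors color_set w && !(w == u) && !(w == v)) = [] ∨
      max_sep_size < 1) ∨
    ((PySem.Dict.mk adj).contains u = true ∧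
     (∀ p ∈ adj, ∀ x ∈ p.2, (PySem.Dict.mk colors).contains x = true ∧
       ((PySem.Dict.mk colors).getD x 0 ∈ color_set → (PySem.Dict.mk adj).contains x = true))))

instance (adj : List (Int × List Int)) (colors : List (Int × Int)) (color_set : List Int) (u : Int) (v : Int) (max_sep_size : Int) : Decidable (Pre_find_vertex_separators adj colors color_set u v max_sep_size) := by
  unfold Pre_find_vertex_separators; infer_instance

def pvWitness_find_vertex_separators : (List (Int × List Int)) × (List (Int × Int)) × List Int × Int × Int × Int :=
  ([(1, [2]), (2, [1, 3]), (3, [2])], [(1, 0), (2, 0), (3, 0)], [0], 1, 3, 3)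

def Spec_find_vertex_separators (adj : List (Int × List Int)) (colors : List (Int × Int)) (color_set : List Int) (u : Int) (v : Int) (max_sep_size : Int) (out : List (List Int)) : Prop := out = find_vertex_separators_alt adj colors color_set u v max_sep_size
instance (adj : List (Int × List Int)) (colors : List (Int × Int)) (color_set : List Int) (u : Int) (v : Int) (max_sep_size : Int) (out : List (List Int)) : Decidable (Spec_find_vertex_separators adj colors color_set u v max_sep_size out) := by unfold Spec_find_vertex_separators; infer_instance

-- ===== CLAIM (what is proved, stated in full; the proofs are below) =====
def Claim_equal_find_vertex_separators : Prop := ∀ (adj : List (Int × List Int)) (colors : List (Int × Int)) (color_set : List Int) (u : Int) (v : Int) (max_sep_size : Int), Dom_find_vertex_separators adj colors color_set u v max_sep_size → Pre_find_vertex_separators adj colors color_set u v max_sep_size → Spec_find_vertex_separators adj colors color_set u v max_sep_size (find_vertex_separators adj colors color_set u v max_sep_size)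

-- ===== LEMMAS AND PROOFS =====

-- Vertices reachable from u while avoiding sepS, restricted to color_set (the common specification
-- both connectivity searches are proved to compute membership in).
inductive fvsRch (adj : List (Int × List Int)) (colors : List (Int × Int)) (cs : List Int) (sepS : PySem.Set Int) (u : Int) : Int → Prop
  | base : fvsRch adj colors cs sepS u u
  | step {w x : Int} : fvsRch adj colors cs sepS u w → x ∈ fvsRow adj w →
      sepS.contains x = false → fvsColorOk colors cs x = true → fvsRch adj colors cs sepS u x

theorem fvsRch_minimal (adj : List (Int × List Int)) (colors : List (Int × Int)) (cs : List Int) (sepS : PySem.Set Int) (u : Int)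
    (S : Int → Prop) (hu : S u)
    (hcl : ∀ w x, S w → x ∈ fvsRow adj w → sepS.contains x = false → fvsColorOk colors cs x = true → S x) :
    ∀ y, fvsRch adj colors cs sepS u y → S y := by
  intro y h
  induction h with
  | base => exact hu
  | step hw hx hs hc ih => exact hcl _ _ ih hx hs hc

theorem fvsRow_source (adj : List (Int × List Int)) (w x : Int) (hx : x ∈ fvsRow adj w) :
    ∃ p ∈ adj, p.1 = w ∧ x ∈ p.2 := by
  induction adj with
  | nil =>
    exfalso
    simp [fvsRow, PySem.Dict.getD_eq_get?_getD] at hx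
    cases h : (PySem.Dict.mk ([] : List (Int × List Int))).get? w <;> simp [h] at hx
    · revert h; simp [PySem.Dict.get?]
  | cons p rest ih =>
    rw [fvsRow_cons] at hx
    by_cases h : p.1 == w
    · rw [if_pos h] at hx
      exact ⟨p, by simp, by simpa using h, hx⟩
    · rw [if_neg h] at hx
      obtain ⟨q, hq, hq1, hq2⟩ := ih hx
      exact ⟨q, by simp [hq], hq1, hq2⟩

theorem contains_mk_iff {ν : Type} (l : List (Int × ν)) (w : Int) :
    (PySem.Dict.mk l).contains w = true ↔ w ∈ l.map Prod.fst := by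
  rw [PySem.Dict.contains_iff_mem_keys]
  simp [PySem.Dict.keys]

theorem fvsNotMem (s : PySem.Set Int) (x : Int) (h : PySem.Set.contains s x = false) : x ∉ s := by
  intro hm
  rw [(PySem.Set.contains_iff s x).mpr hm] at h
  cases h

theorem fvsContainsFalse (s : PySem.Set Int) (x : Int) (h : x ∉ s) : PySem.Set.contains s x = false := by
  rw [← Bool.not_eq_true]
  intro hc
  exact h ((PySem.Set.contains_iff s x).mp hc)

-- ---- A side: the stack DFS computes membership in fvsRch ----

theorem dfsA_mono (adj : List (Int × List Int)) (colors : List (Int × Int)) (cs : List Int) (sepS : PySem.Set Int) :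
    ∀ (vis : PySem.Set Int) (st : List Int), ∀ y ∈ vis, y ∈ dfsA adj colors cs sepS vis st := by
  intro vis st
  induction vis, st using dfsA.induct adj colors cs sepS with
  | case1 vis => intro y hy; simpa [dfsA] using hy
  | case2 vis w rest hcond ih =>
    intro y hy
    rw [dfsA, if_pos hcond]
    exact ih y hy
  | case3 vis w rest hcond vis' ih =>
    intro y hy
    rw [dfsA, if_neg hcond]
    exact ih y (by show y ∈ vis.add w; simp [PySem.Set.mem_add, hy])

theorem dfsA_stack (adj : List (Int × List Int)) (colors : List (Int × Int)) (cs : List Int) (sepS : PySem.Set Int) :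
    ∀ (vis : PySem.Set Int) (st : List Int), ∀ y ∈ st, sepS.contains y = false →
      y ∈ dfsA adj colors cs sepS vis st := by
  intro vis st
  induction vis, st using dfsA.induct adj colors cs sepS with
  | case1 vis => intro y hy; simp at hy
  | case2 vis w rest hcond ih =>
    intro y hy hsep
    rw [dfsA, if_pos hcond]
    rcases List.mem_cons.mp hy with rfl | hy2
    · have hv : y ∈ vis := by
        rcases Bool.or_eq_true_iff.mp hcond with hc | hc
        · exact (PySem.Set.contains_iff vis y).mp hc
        · rw [hsep] at hc; cases hc
      exact dfsA_mono adj colors cs sepS vis rest y hv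
    · exact ih y hy2 hsep
  | case3 vis w rest hcond vis' ih =>
    intro y hy hsep
    rw [dfsA, if_neg hcond]
    rcases List.mem_cons.mp hy with rfl | hy2
    · exact dfsA_mono adj colors cs sepS _ _ y (by show y ∈ vis.add y; simp [PySem.Set.mem_add])
    · exact ih y (List.mem_append_right _ hy2) hsep

theorem dfsA_sound (adj : List (Int × List Int)) (colors : List (Int × Int)) (cs : List Int) (sepS : PySem.Set Int) (u : Int) :
    ∀ (vis : PySem.Set Int) (st : List Int),
      (∀ y ∈ vis, fvsRch adj colors cs sepS u y) → (∀ y ∈ st, fvsRch adj colors cs sepS u y) →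
      ∀ y ∈ dfsA adj colors cs sepS vis st, fvsRch adj colors cs sepS u y := by
  intro vis st
  induction vis, st using dfsA.induct adj colors cs sepS with
  | case1 vis => intro hv _ y hy; exact hv y (by simpa [dfsA] using hy)
  | case2 vis w rest hcond ih =>
    intro hv hs y hy
    rw [dfsA, if_pos hcond] at hy
    exact ih hv (fun z hz => hs z (List.mem_cons_of_mem _ hz)) y hy
  | case3 vis w rest hcond vis' ih =>
    intro hv hs y hy
    rw [dfsA, if_neg hcond] at hy
    refine ih ?_ ?_ y hy
    · intro z hz
      have h0 : z ∈ vis.add w := hz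
      rcases (by simpa [PySem.Set.mem_add] using h0 : z ∈ vis ∨ z = w) with h | rfl
      · exact hv z h
      · exact hs z (List.mem_cons_self)
    · intro z hz
      rcases List.mem_append.mp hz with h | h
      · have h2 := List.mem_filter.mp (List.mem_reverse.mp h)
        have hrow : z ∈ fvsRow adj w := h2.1
        have hg := h2.2
        simp only [Bool.and_eq_true, Bool.not_eq_true'] at hg
        exact fvsRch.step (hs w List.mem_cons_self) hrow hg.1.2 hg.2
      · exact hs z (List.mem_cons_of_mem _ h)

theorem dfsA_closed (adj : List (Int × List Int)) (colors : List (Int × Int)) (cs : List Int) (sepS : PySem.Set Int) :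
    ∀ (vis : PySem.Set Int) (st : List Int),
      (∀ w ∈ vis, ∀ x ∈ fvsRow adj w, sepS.contains x = false → fvsColorOk colors cs x = true →
        (x ∈ vis ∨ x ∈ st)) →
      ∀ w ∈ dfsA adj colors cs sepS vis st, ∀ x ∈ fvsRow adj w,
        sepS.contains x = false → fvsColorOk colors cs x = true → x ∈ dfsA adj colors cs sepS vis st := by
  intro vis st
  induction vis, st using dfsA.induct adj colors cs sepS with
  | case1 vis =>
    intro hinv w hw x hx hsep hcok
    rw [dfsA] at hw ⊢
    rcases hinv w hw x hx hsep hcok with h | h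
    · exact h
    · simp at h
  | case2 vis w rest hcond ih =>
    intro hinv
    rw [dfsA, if_pos hcond]
    refine ih ?_
    intro w' hw' x hx hsep hcok
    rcases hinv w' hw' x hx hsep hcok with h | h
    · exact Or.inl h
    · rcases List.mem_cons.mp h with rfl | h2
      · rcases Bool.or_eq_true_iff.mp hcond with hc | hc
        · exact Or.inl ((PySem.Set.contains_iff vis x).mp hc)
        · rw [hsep] at hc; cases hc
      · exact Or.inr h2
  | case3 vis w rest hcond vis' ih =>
    intro hinv
    rw [dfsA, if_neg hcond]
    refine ih ?_
    intro w' hw' x hx hsep hcok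
    by_cases hxv : x ∈ vis.add w
    · exact Or.inl hxv
    · have h0 : w' ∈ vis.add w := hw'
      rcases (by simpa [PySem.Set.mem_add] using h0 : w' ∈ vis ∨ w' = w) with h | rfl
      · rcases hinv w' h x hx hsep hcok with h2 | h2
        · exact Or.inl (by show x ∈ vis.add w; simp [PySem.Set.mem_add, h2])
        · rcases List.mem_cons.mp h2 with rfl | h3
          · exact Or.inl (by show x ∈ vis.add x; simp [PySem.Set.mem_add])
          · exact Or.inr (List.mem_append_right _ h3)
      · refine Or.inr (List.mem_append_left _ ?_)
        rw [List.mem_reverse]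
        refine List.mem_filter.mpr ⟨hx, ?_⟩
        simp only [Bool.and_eq_true, Bool.not_eq_true']
        exact ⟨⟨fvsContainsFalse _ _ hxv, hsep⟩, hcok⟩
  

theorem dfsA_iff (adj : List (Int × List Int)) (colors : List (Int × Int)) (cs : List Int) (sepS : PySem.Set Int) (u : Int)
    (hu : sepS.contains u = false) :
    ∀ y, y ∈ dfsA adj colors cs sepS PySem.Set.empty [u] ↔ fvsRch adj colors cs sepS u y := by
  intro y
  constructor
  · refine dfsA_sound adj colors cs sepS u PySem.Set.empty [u] ?_ ?_ y
    · intro z hz; simp [PySem.Set.empty] at hz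
    · intro z hz
      rcases List.mem_cons.mp hz with rfl | h
      · exact fvsRch.base
      · simp at h
  · refine fvsRch_minimal adj colors cs sepS u (fun z => z ∈ dfsA adj colors cs sepS PySem.Set.empty [u]) ?_ ?_ y
    · exact dfsA_stack adj colors cs sepS PySem.Set.empty [u] u List.mem_cons_self hu
    · intro w x hw hx hsep hcok
      refine dfsA_closed adj colors cs sepS PySem.Set.empty [u] ?_ w hw x hx hsep hcok
      intro w' hw'
      simp [PySem.Set.empty] at hw' 

-- ---- B side: the level-synchronous BFS computes membership in fvsRch ----

theorem fvsFold_shape (colors : List (Int × Int)) (cs : List Int) (sepS : PySem.Set Int) (base : List Int) :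
    ∀ (xs : List Int) (s : PySem.Set Int × List Int), s.1 = base ++ s.2 →
      ∃ t, (xs.foldl (fvsStep colors cs sepS) s).1 = base ++ s.2 ++ t ∧
           (xs.foldl (fvsStep colors cs sepS) s).2 = s.2 ++ t ∧
           ∀ y ∈ t, y ∈ xs ∧ sepS.contains y = false ∧ fvsColorOk colors cs y = true := by
  intro xs
  induction xs with
  | nil => intro s hsh; exact ⟨[], by simpa using hsh, by simp, by simp⟩
  | cons x xs ih =>
    intro s hsh
    simp only [List.foldl_cons]
    by_cases hg : (!s.1.contains x && !sepS.contains x && fvsColorOk colors cs x) = true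
    · have hx : x ∉ s.1 := by
        intro hmem
        simp only [Bool.and_eq_true, Bool.not_eq_true'] at hg
        have hct := (PySem.Set.contains_iff s.1 x).mpr hmem
        rw [hg.1.1] at hct
        cases hct
      have hstep : fvsStep colors cs sepS s x = (s.1 ++ [x], s.2 ++ [x]) := by
        unfold fvsStep
        rw [if_pos hg, PySem.Set.add_of_not_mem hx]
      rw [hstep]
      obtain ⟨t, h1, h2, h3⟩ := ih (s.1 ++ [x], s.2 ++ [x]) (by simp [hsh])
      refine ⟨x :: t, ?_, ?_, ?_⟩
      · rw [h1]; simp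
      · rw [h2]; simp
      · intro y hy
        rcases List.mem_cons.mp hy with rfl | hy2
        · simp only [Bool.and_eq_true, Bool.not_eq_true'] at hg
          exact ⟨by simp, hg.1.2, hg.2⟩
        · obtain ⟨ha, hb, hcc⟩ := h3 y hy2
          exact ⟨by simp [ha], hb, hcc⟩
    · have hstep : fvsStep colors cs sepS s x = s := by
        unfold fvsStep; rw [if_neg hg]
      rw [hstep]
      obtain ⟨t, h1, h2, h3⟩ := ih s hsh
      exact ⟨t, h1, h2, fun y hy => ⟨by simp [(h3 y hy).1], (h3 y hy).2.1, (h3 y hy).2.2⟩⟩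

theorem fvsFold_nodup (colors : List (Int × Int)) (cs : List Int) (sepS : PySem.Set Int) :
    ∀ (xs : List Int) (s : PySem.Set Int × List Int), s.1.Nodup →
      ((xs.foldl (fvsStep colors cs sepS) s).1).Nodup := by
  intro xs
  induction xs with
  | nil => intro s h; simpa using h
  | cons x xs ih =>
    intro s h
    simp only [List.foldl_cons]
    apply ih
    unfold fvsStep
    split
    · exact PySem.Set.nodup_add _ _ h
    · exact h

theorem fvsFold_mono (colors : List (Int × Int)) (cs : List Int) (sepS : PySem.Set Int) :
    ∀ (xs : List Int) (s : PySem.Set Int × List Int) (y : Int), y ∈ s.1 →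
      y ∈ (xs.foldl (fvsStep colors cs sepS) s).1 := by
  intro xs
  induction xs with
  | nil => intro s y hy; simpa using hy
  | cons x xs ih =>
    intro s y hy
    simp only [List.foldl_cons]
    apply ih
    unfold fvsStep
    split
    · simpa using Or.inl hy
    · exact hy

theorem fvsFold_covers (colors : List (Int × Int)) (cs : List Int) (sepS : PySem.Set Int) :
    ∀ (xs : List Int) (s : PySem.Set Int × List Int), ∀ x ∈ xs,
      sepS.contains x = false → fvsColorOk colors cs x = true →
      x ∈ (xs.foldl (fvsStep colors cs sepS) s).1 := by
  intro xs
  induction xs with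
  | nil => intro s x hx; simp at hx
  | cons a xs ih =>
    intro s x hx hs hc
    rcases List.mem_cons.mp hx with rfl | hx2
    · simp only [List.foldl_cons]
      by_cases hmem : x ∈ s.1
      · exact fvsFold_mono colors cs sepS xs _ x (by
          unfold fvsStep; split
          · simpa using Or.inl hmem
          · exact hmem)
      · apply fvsFold_mono colors cs sepS xs _ x
        unfold fvsStep
        have hcon : s.1.contains x = false := by
          rw [← Bool.not_eq_true]; intro hh; exact hmem (by simpa using hh)
        rw [if_pos (by simp [hc]; exact ⟨hmem, fvsNotMem sepS x hs⟩)]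
        simp [PySem.Set.mem_add]
    · exact ih _ x hx2 hs hc

theorem fvsRound_shape (adj : List (Int × List Int)) (colors : List (Int × Int)) (cs : List Int) (sepS : PySem.Set Int) (base : List Int) :
    ∀ (front : List Int) (s : PySem.Set Int × List Int), s.1 = base ++ s.2 →
      ∃ t, (front.foldl (fun t w => (fvsRow adj w).foldl (fvsStep colors cs sepS) t) s).1 = base ++ s.2 ++ t ∧
           (front.foldl (fun t w => (fvsRow adj w).foldl (fvsStep colors cs sepS) t) s).2 = s.2 ++ t ∧
           ∀ y ∈ t, (∃ w ∈ front, y ∈ fvsRow adj w) ∧ sepS.contains y = false ∧ fvsColorOk colors cs y = true := by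
  intro front
  induction front with
  | nil => intro s hsh; exact ⟨[], by simpa using hsh, by simp, by simp⟩
  | cons w ws ih =>
    intro s hsh
    simp only [List.foldl_cons]
    obtain ⟨t1, h1, h2, h3⟩ := fvsFold_shape colors cs sepS base (fvsRow adj w) s hsh
    obtain ⟨t2, g1, g2, g3⟩ := ih ((fvsRow adj w).foldl (fvsStep colors cs sepS) s)
      (by rw [h1, h2]; simp)
    refine ⟨t1 ++ t2, ?_, ?_, ?_⟩
    · rw [g1, h2]; simp
    · rw [g2, h2]; simp
    · intro y hy
      rcases List.mem_append.mp hy with h | h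
      · obtain ⟨ha, hb, hc⟩ := h3 y h
        exact ⟨⟨w, by simp, ha⟩, hb, hc⟩
      · obtain ⟨⟨w', hw', ha⟩, hb, hc⟩ := g3 y h
        exact ⟨⟨w', by simp [hw'], ha⟩, hb, hc⟩

theorem fvsRound_nodup (adj : List (Int × List Int)) (colors : List (Int × Int)) (cs : List Int) (sepS : PySem.Set Int) :
    ∀ (front : List Int) (s : PySem.Set Int × List Int), s.1.Nodup →
      ((front.foldl (fun t w => (fvsRow adj w).foldl (fvsStep colors cs sepS) t) s).1).Nodup := by
  intro front
  induction front with
  | nil => intro s h; simpa using h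
  | cons w ws ih =>
    intro s h
    simp only [List.foldl_cons]
    exact ih _ (fvsFold_nodup colors cs sepS (fvsRow adj w) s h)

theorem fvsRound_mono (adj : List (Int × List Int)) (colors : List (Int × Int)) (cs : List Int) (sepS : PySem.Set Int) :
    ∀ (front : List Int) (s : PySem.Set Int × List Int) (y : Int), y ∈ s.1 →
      y ∈ (front.foldl (fun t w => (fvsRow adj w).foldl (fvsStep colors cs sepS) t) s).1 := by
  intro front
  induction front with
  | nil => intro s y hy; simpa using hy
  | cons w ws ih =>
    intro s y hy
    simp only [List.foldl_cons]
    exact ih _ y (fvsFold_mono colors cs sepS (fvsRow adj w) s y hy)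

theorem fvsRound_covers (adj : List (Int × List Int)) (colors : List (Int × Int)) (cs : List Int) (sepS : PySem.Set Int) :
    ∀ (front : List Int) (s : PySem.Set Int × List Int), ∀ w ∈ front, ∀ x ∈ fvsRow adj w,
      sepS.contains x = false → fvsColorOk colors cs x = true →
      x ∈ (front.foldl (fun t w => (fvsRow adj w).foldl (fvsStep colors cs sepS) t) s).1 := by
  intro front
  induction front with
  | nil => intro s w hw; simp at hw
  | cons w' ws ih =>
    intro s w hw x hx hsep hcok
    rcases List.mem_cons.mp hw with rfl | hw2
    · simp only [List.foldl_cons]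
      exact fvsRound_mono adj colors cs sepS ws _ x
        (fvsFold_covers colors cs sepS (fvsRow adj w) s x hx hsep hcok)
    · simp only [List.foldl_cons]
      exact ih _ w hw2 x hx hsep hcok

def fvsIter (adj : List (Int × List Int)) (colors : List (Int × Int)) (cs : List Int) (sepS : PySem.Set Int) (u : Int)
    (k : Nat) : PySem.Set Int × List Int :=
  (fun s => fvsRound adj colors cs sepS s)^[k] ([u], [u])

theorem foldl_const_eq_iterate {α β : Type} (l : List α) (f : β → β) (b : β) :
    l.foldl (fun s _ => f s) b = f^[l.length] b := by
  induction l generalizing b with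
  | nil => rfl
  | cons x xs ih => simp [List.foldl_cons, ih, Function.iterate_succ_apply]

theorem fvsConnected_eq_iter (adj : List (Int × List Int)) (colors : List (Int × Int)) (cs : List Int) (sepS : PySem.Set Int) (u v : Int) :
    fvsConnected adj colors cs sepS u v = (fvsIter adj colors cs sepS u (adj.length + 1)).1.contains v := by
  unfold fvsConnected fvsIter
  rw [foldl_const_eq_iterate, PySem.List.length_pyRange_one]
  norm_num

theorem fvsIter_inv (adj : List (Int × List Int)) (colors : List (Int × Int)) (cs : List Int) (sepS : PySem.Set Int) (u : Int)
    (HP : ∀ p ∈ adj, ∀ x ∈ p.2, fvsColorOk colors cs x = true → x ∈ adj.map Prod.fst) :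
    ∀ k : Nat,
      ((fvsIter adj colors cs sepS u k).1).Nodup ∧
      u ∈ (fvsIter adj colors cs sepS u k).1 ∧
      (∀ y ∈ (fvsIter adj colors cs sepS u k).2, y ∈ (fvsIter adj colors cs sepS u k).1) ∧
      (∀ y ∈ (fvsIter adj colors cs sepS u k).1, y = u ∨ y ∈ adj.map Prod.fst) ∧
      (∀ y ∈ (fvsIter adj colors cs sepS u k).1, fvsRch adj colors cs sepS u y) ∧
      (∀ w ∈ (fvsIter adj colors cs sepS u k).1, w ∉ (fvsIter adj colors cs sepS u k).2 →
        ∀ x ∈ fvsRow adj w, sepS.contains x = false → fvsColorOk colors cs x = true →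
          x ∈ (fvsIter adj colors cs sepS u k).1) ∧
      ((fvsIter adj colors cs sepS u k).2 ≠ [] → k + 1 ≤ ((fvsIter adj colors cs sepS u k).1).length) := by
  intro k
  induction k with
  | zero =>
    refine ⟨by simp [fvsIter], by simp [fvsIter], by simp [fvsIter], ?_, ?_, ?_, by simp [fvsIter]⟩
    · intro y hy; simp [fvsIter] at hy; exact Or.inl hy
    · intro y hy; simp [fvsIter] at hy; subst hy; exact fvsRch.base
    · intro w hw hnf; exfalso; exact hnf (by simpa [fvsIter] using hw)
  | succ k IH =>
    obtain ⟨hnd, hu, hfr, hbound, hsound, hclosed, hgrow⟩ := IH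
    have hsucc : fvsIter adj colors cs sepS u (k + 1)
        = ((fvsIter adj colors cs sepS u k).2).foldl
            (fun t w => (fvsRow adj w).foldl (fvsStep colors cs sepS) t)
            ((fvsIter adj colors cs sepS u k).1, []) := by
      rw [fvsIter, Function.iterate_succ_apply']
      rfl
    obtain ⟨t, h1, h2, h3⟩ := fvsRound_shape adj colors cs sepS
      ((fvsIter adj colors cs sepS u k).1) ((fvsIter adj colors cs sepS u k).2)
      ((fvsIter adj colors cs sepS u k).1, []) (by simp)
    rw [hsucc]
    simp only [List.append_nil, List.nil_append] at h1 h2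
    refine ⟨?_, ?_, ?_, ?_, ?_, ?_, ?_⟩
    · exact fvsRound_nodup adj colors cs sepS _ _ hnd
    · exact fvsRound_mono adj colors cs sepS _ _ u hu
    · intro y hy
      rw [h2] at hy
      rw [h1]
      exact List.mem_append_right _ hy
    · intro y hy
      rw [h1] at hy
      rcases List.mem_append.mp hy with h | h
      · exact hbound y h
      · obtain ⟨⟨w, _, hrow⟩, _, hcok⟩ := h3 y h
        obtain ⟨p, hp, _, hyp⟩ := fvsRow_source adj w y hrow
        exact Or.inr (HP p hp y hyp hcok)
    · intro y hy
      rw [h1] at hy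
      rcases List.mem_append.mp hy with h | h
      · exact hsound y h
      · obtain ⟨⟨w, hwf, hrow⟩, hsep, hcok⟩ := h3 y h
        exact fvsRch.step (hsound w (hfr w hwf)) hrow hsep hcok
    · intro w hw hnf x hx hsep hcok
      rw [h1] at hw
      rcases List.mem_append.mp hw with h | h
      · by_cases hwf : w ∈ (fvsIter adj colors cs sepS u k).2
        · exact fvsRound_covers adj colors cs sepS _ _ w hwf x hx hsep hcok
        · have := hclosed w h hwf x hx hsep hcok
          exact fvsRound_mono adj colors cs sepS _ _ x this
      · exfalso; exact hnf (by rw [h2]; exact h)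
    · intro hne
      have htne : t ≠ [] := by
        intro hteq; rw [hteq] at h2; exact hne h2
      have hfne : (fvsIter adj colors cs sepS u k).2 ≠ [] := by
        intro hfeq
        rw [hfeq] at h2
        simp at h2
        exact htne (by rw [← h2])
      have hlen : ((fvsIter adj colors cs sepS u k).1).length + 1
          ≤ ((((fvsIter adj colors cs sepS u k).2).foldl
              (fun t w => (fvsRow adj w).foldl (fvsStep colors cs sepS) t)
              ((fvsIter adj colors cs sepS u k).1, [])).1).length := by
        rw [h1, List.length_append]
        have : 1 ≤ t.length := by
          cases t with
          | nil => exact absurd rfl htne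
          | cons a b => simp
        omega
      have := hgrow hfne
      omega

theorem fvsIter_final_front (adj : List (Int × List Int)) (colors : List (Int × Int)) (cs : List Int) (sepS : PySem.Set Int) (u : Int)
    (HP : ∀ p ∈ adj, ∀ x ∈ p.2, fvsColorOk colors cs x = true → x ∈ adj.map Prod.fst) :
    (fvsIter adj colors cs sepS u (adj.length + 1)).2 = [] := by
  by_contra hne
  obtain ⟨hnd, _, _, hbound, _, _, hgrow⟩ := fvsIter_inv adj colors cs sepS u HP (adj.length + 1)
  have h1 := hgrow hne
  have hsub : ((fvsIter adj colors cs sepS u (adj.length + 1)).1).toFinset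
      ⊆ (u :: adj.map Prod.fst).toFinset := by
    intro y hy
    rw [List.mem_toFinset] at hy ⊢
    rcases hbound y hy with h | h
    · simp [h]
    · simp [h]
  have h2 : ((fvsIter adj colors cs sepS u (adj.length + 1)).1).length
      ≤ adj.length + 1 := by
    calc ((fvsIter adj colors cs sepS u (adj.length + 1)).1).length
        = ((fvsIter adj colors cs sepS u (adj.length + 1)).1).toFinset.card :=
          (List.toFinset_card_of_nodup hnd).symm
      _ ≤ (u :: adj.map Prod.fst).toFinset.card := Finset.card_le_card hsub
      _ ≤ (u :: adj.map Prod.fst).length := List.toFinset_card_le _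
      _ = adj.length + 1 := by simp
  omega

theorem fvsB_iff (adj : List (Int × List Int)) (colors : List (Int × Int)) (cs : List Int) (sepS : PySem.Set Int) (u : Int)
    (HP : ∀ p ∈ adj, ∀ x ∈ p.2, fvsColorOk colors cs x = true → x ∈ adj.map Prod.fst) :
    ∀ y, y ∈ (fvsIter adj colors cs sepS u (adj.length + 1)).1 ↔ fvsRch adj colors cs sepS u y := by
  intro y
  obtain ⟨hnd, hu, hfr, hbound, hsound, hclosed, hgrow⟩ := fvsIter_inv adj colors cs sepS u HP (adj.length + 1)
  constructor
  · exact hsound y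
  · refine fvsRch_minimal adj colors cs sepS u
      (fun z => z ∈ (fvsIter adj colors cs sepS u (adj.length + 1)).1) hu ?_ y
    intro w x hw hx hsep hcok
    refine hclosed w hw ?_ x hx hsep hcok
    rw [fvsIter_final_front adj colors cs sepS u HP]
    simp

-- ---- the two connectivity tests agree ----

theorem conn_eq (adj : List (Int × List Int)) (colors : List (Int × Int)) (cs : List Int) (sepS : PySem.Set Int) (u v : Int)
    (hu : sepS.contains u = false)
    (HP : ∀ p ∈ adj, ∀ x ∈ p.2, fvsColorOk colors cs x = true → x ∈ adj.map Prod.fst) :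
    (dfsA adj colors cs sepS PySem.Set.empty [u]).contains v = fvsConnected adj colors cs sepS u v := by
  rw [fvsConnected_eq_iter]
  by_cases h : fvsRch adj colors cs sepS u v
  · have h1 : (dfsA adj colors cs sepS PySem.Set.empty [u]).contains v = true :=
      (PySem.Set.contains_iff _ _).mpr ((dfsA_iff adj colors cs sepS u hu v).mpr h)
    have h2 : ((fvsIter adj colors cs sepS u (adj.length + 1)).1).contains v = true :=
      (PySem.Set.contains_iff _ _).mpr ((fvsB_iff adj colors cs sepS u HP v).mpr h)
    rw [h1, h2]
  · have h1 : (dfsA adj colors cs sepS PySem.Set.empty [u]).contains v = false :=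
      fvsContainsFalse _ _ (fun hm => h ((dfsA_iff adj colors cs sepS u hu v).mp hm))
    have h2 : ((fvsIter adj colors cs sepS u (adj.length + 1)).1).contains v = false :=
      fvsContainsFalse _ _ (fun hm => h ((fvsB_iff adj colors cs sepS u HP v).mp hm))
    rw [h1, h2]

-- ---- outer assembly ----

theorem fvsCombos_subset (l : List Int) : ∀ (k : Nat) (sep : List Int), sep ∈ fvsCombos l k →
    ∀ x ∈ sep, x ∈ l := by
  induction l with
  | nil =>
    intro k sep hsep x hx
    cases k with
    | zero => simp [fvsCombos] at hsep; subst hsep; simp at hx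
    | succ k => simp [fvsCombos] at hsep
  | cons a l ih =>
    intro k sep hsep x hx
    cases k with
    | zero => simp [fvsCombos] at hsep; subst hsep; simp at hx
    | succ k =>
      simp only [fvsCombos, List.mem_append, List.mem_map] at hsep
      rcases hsep with ⟨t, ht, rfl⟩ | h
      · rcases List.mem_cons.mp hx with rfl | hx2
        · simp
        · exact List.mem_cons_of_mem _ (ih k t ht x hx2)
      · exact List.mem_cons_of_mem _ (ih (k+1) sep h x hx)

theorem u_not_mem_verts (adj : List (Int × List Int)) (colors : List (Int × Int)) (cs : List Int) (u v : Int) :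
    u ∉ fvsVerts adj colors cs u v := by
  intro h
  simp only [fvsVerts, List.mem_filter] at h
  have := h.2
  simp at this

-- ===== VERDICT (by name: the statement is the Claim_ definition above) =====
theorem find_vertex_separators_spec : Claim_equal_find_vertex_separators := by
  intro adj colors color_set u v max_sep_size hDom hPre
  obtain ⟨hknd, hcnd, hck, hdisj⟩ := hPre
  unfold Spec_find_vertex_separators
  rcases hdisj with hempty | ⟨hcu, hnb⟩
  · -- no candidate separator: the size range is empty and both sides return []
    have hle : min (max_sep_size + 1) (((fvsVerts adj colors color_set u v).length : Int) + 1) ≤ 1 := by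
      rcases hempty with he | hm
      · have hv : fvsVerts adj colors color_set u v = [] := he
        rw [hv]
        simpa using min_le_right _ _
      · have := min_le_left (max_sep_size + 1)
          (((fvsVerts adj colors color_set u v).length : Int) + 1)
        omega
    have hsz : PySem.List.pyRange 1
        (min (max_sep_size + 1) (((fvsVerts adj colors color_set u v).length : Int) + 1)) 1 = [] :=
      PySem.List.pyRange_one_eq_nil hle
    unfold find_vertex_separators find_vertex_separators_alt
    simp only []
    rw [hsz]
    simp
  have HP : ∀ p ∈ adj, ∀ x ∈ p.2, fvsColorOk colors color_set x = true → x ∈ adj.map Prod.fst := by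
    intro p hp x hx hcok
    have hmem : (PySem.Dict.mk colors).getD x 0 ∈ color_set := by
      simpa [fvsColorOk] using hcok
    exact (contains_mk_iff adj x).mp ((hnb p hp x hx).2 hmem)
  unfold find_vertex_separators find_vertex_separators_alt
  simp only []
  have key : ∀ (szs : List Int) (acc : List (List Int)),
      szs.foldl (fun seps size =>
        (fvsCombos (fvsVerts adj colors color_set u v) size.toNat).foldl (fun seps sep =>
          if (!(dfsA adj colors color_set (PySem.Set.ofList sep) PySem.Set.empty [u]).contains v) = true then
            seps ++ [sep]
          else seps) seps) acc
      = acc ++ szs.flatMap (fun size =>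
          (fvsCombos (fvsVerts adj colors color_set u v) size.toNat).filter
            (fun sep => !fvsConnected adj colors color_set (PySem.Set.ofList sep) u v)) := by
    intro szs
    induction szs with
    | nil => intro acc; simp
    | cons z zs ih =>
      intro acc
      simp only [List.foldl_cons, List.flatMap_cons]
      rw [PySem.List.foldl_append_if_eq_filter, ih]
      have hfc : (fvsCombos (fvsVerts adj colors color_set u v) z.toNat).filter
            (fun sep => !(dfsA adj colors color_set (PySem.Set.ofList sep) PySem.Set.empty [u]).contains v)
          = (fvsCombos (fvsVerts adj colors color_set u v) z.toNat).filter
            (fun sep => !fvsConnected adj colors color_set (PySem.Set.ofList sep) u v) := by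
        refine List.filter_congr ?_
        intro sep hsep
        have hun : u ∉ PySem.Set.ofList sep := by
          intro hm
          rw [PySem.Set.mem_ofList] at hm
          exact u_not_mem_verts adj colors color_set u v
            (fvsCombos_subset (fvsVerts adj colors color_set u v) z.toNat sep hsep u hm)
        rw [conn_eq adj colors color_set _ u v (fvsContainsFalse _ _ hun) HP]
      rw [hfc, List.append_assoc]
  rw [key]
  simp
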